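-- pv_equiv track=rewrite | github.com/nwrousell/dimspector | tests/programs/correct/ir.py | for_with_if
-- ===== SOURCE A (Python) =====
-- def for_with_if(n):
--     total = 0
--     for i in range(n):
--         if i > 5:
--             total = total + i
--         else:
--             total = total + 1
--     return total
-- ===== SOURCE B (Python) =====
-- def for_with_if(n):
--     # closed form: first min(n,6) iterations add 1 each; i=6..n-1 add i
--     if n <= 6:
--         return max(n, 0)
--     return n * (n - 1) // 2 - 9
-- ===== Notes on version B (the rewrite author's own statement) =====
-- stated objective: faster
-- what changed: Replaced the O(n) loop by a closed-form arithmetic-series formula split at the threshold (min(n,6) ones plus the sum 6..n-1).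
import Mathlib
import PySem

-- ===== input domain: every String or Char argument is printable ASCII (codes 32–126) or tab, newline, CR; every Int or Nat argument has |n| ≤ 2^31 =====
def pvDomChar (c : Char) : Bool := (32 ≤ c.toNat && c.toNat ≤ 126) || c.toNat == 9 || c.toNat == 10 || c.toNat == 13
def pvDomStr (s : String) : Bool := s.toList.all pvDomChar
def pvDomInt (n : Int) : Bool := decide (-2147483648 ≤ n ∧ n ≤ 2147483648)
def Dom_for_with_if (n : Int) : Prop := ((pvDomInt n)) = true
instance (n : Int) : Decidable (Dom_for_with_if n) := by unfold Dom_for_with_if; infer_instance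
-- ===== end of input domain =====

-- B replaces A's O(n) loop by a closed-form arithmetic-series formula (O(1)).

-- ===== PORT A =====
def for_with_if (n : Int) : Int :=
  (PySem.List.pyRange 0 n 1).foldl (fun total i => if i > 5 then total + i else total + 1) 0

-- ===== PORT B =====
def for_with_if_alt (n : Int) : Int :=
  if n ≤ 6 then max n 0
  else PySem.Int.floordiv (n * (n - 1)) 2 - 9

-- ===== PRECONDITION & SPEC =====
def Spec_for_with_if (n : Int) (out : Int) : Prop := out = for_with_if_alt n
instance (n : Int) (out : Int) : Decidable (Spec_for_with_if n out) := by unfold Spec_for_with_if; infer_instance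

-- ===== CLAIM (what is proved, stated in full; the proofs are below) =====
def Claim_equal_for_with_if : Prop := ∀ (n : Int), Dom_for_with_if n → Spec_for_with_if n (for_with_if n)

-- ===== LEMMAS AND PROOFS =====

-- A's loop over range(m) in closed form (stated doubled to avoid division)
lemma for_with_if_fold_closed (m : Nat) :
    2 * ((List.range m).map (fun k : Nat => (0 : Int) + (k : Int))).foldl
        (fun total i => if i > 5 then total + i else total + 1) 0
      = if m ≤ 6 then 2 * (m : Int) else (m : Int) * (m - 1) - 18 := by
  induction m with
  | zero => simp
  | succ m ih =>
    rw [List.range_succ]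
    simp only [List.map_append, List.foldl_append, List.map_cons, List.map_nil,
      List.foldl_cons, List.foldl_nil]
    by_cases h : (0 : Int) + m > 5
    · rw [if_pos h]
      rw [mul_add, ih]
      have h6 : ¬ (m ≤ 5) := by
        intro hle
        have : ((0:Int) + m) ≤ 5 := by omega
        omega
      by_cases h7 : m ≤ 6
      · have hm : m = 6 := by omega
        subst hm; norm_num
      · rw [if_neg h7, if_neg (by omega : ¬ (m + 1 ≤ 6))]
        push_cast; ring
    · rw [if_neg h]
      have hm : m ≤ 5 := by
        by_contra hc
        exact h (by omega)
      rw [mul_add, ih, if_pos (by omega : m ≤ 6), if_pos (by omega : m + 1 ≤ 6)]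
      push_cast; ring

-- ===== VERDICT (by name: the statement is the Claim_ definition above) =====
theorem for_with_if_spec : Claim_equal_for_with_if := by
  intro n _
  unfold Spec_for_with_if for_with_if for_with_if_alt
  rw [PySem.List.pyRange_one]
  have key := for_with_if_fold_closed ((n - 0).toNat)
  by_cases hn : n ≤ 6
  · rw [if_pos hn]
    by_cases h0 : n ≤ 0
    · have : (n - 0).toNat = 0 := by omega
      rw [this] at key ⊢
      simp at key ⊢
      omega
    · have hle : ((n - 0).toNat : Int) = n := by omega
      rw [if_pos (by omega : (n - 0).toNat ≤ 6)] at key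
      rw [hle] at key
      omega
  · rw [if_neg hn]
    have hle : ((n - 0).toNat : Int) = n := by omega
    rw [if_neg (by omega : ¬ (n - 0).toNat ≤ 6), hle] at key
    obtain ⟨r, hr⟩ := Int.even_mul_pred_self n
    have hk : n * (n - 1) = 2 * r := by omega
    have hfd : PySem.Int.floordiv (n * (n - 1)) 2 = r := by
      rw [PySem.Int.floordiv_eq_ediv_of_pos (by norm_num), hk]
      exact Int.mul_ediv_cancel_left r (by norm_num)
    rw [hfd]
    omega
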